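-- pv_equiv track=rewrite | github.com/DhiraPT/leetcode | 3255. Find the Power of K-Size Subarrays II/find_the_power_of_k_size_subarrays_ii.py | resultsArray
-- ===== SOURCE A (Python) =====
-- from typing import List
--
-- def resultsArray(nums: List[int], k: int) -> List[int]:
--     if k == 1:
--         return nums
--
--     n = len(nums)
--     res = []
--
--     i = 0
--     prev_valid = False
--     while i <= n - k:
--         if prev_valid:
--             if nums[i+k-1] - nums[i+k-2] == 1:
--                 res.append(nums[i+k-1])
--             else:
--                 res.append(-1)
--                 prev_valid = False
--             i += 1
--         else:
--             is_valid = True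
--             for j in range(i, i + k - 1):
--                 if nums[j+1] - nums[j] != 1:
--                     is_valid = False
--                     break
--
--             if is_valid:
--                 res.append(nums[i+k-1])
--                 i += 1
--             else:
--                 res.extend([-1] * (min(n - k, j) + 1 - i))
--                 i = j + 1
--             prev_valid = is_valid
--
--     return res
-- ===== SOURCE B (Python) =====
-- from typing import List
--
-- def resultsArray(nums: List[int], k: int) -> List[int]:
--     n = len(nums)
--     res = [-1] * max(0, n - k + 1)
--     cnt = 0
--     for i, x in enumerate(nums):
--         cnt = cnt + 1 if i > 0 and x - nums[i - 1] == 1 else 1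
--         if cnt >= k:
--             res[i - k + 1] = x
--     return res
-- ===== Notes on version B (the rewrite author's own statement) =====
-- stated objective: simpler
-- what changed: Replaces A's two-mode while loop (prev_valid fast path, inner validation scan with break-and-jump) by a single uniform pass maintaining one run-length counter and writing into a pre-filled result list; the uniform pass also measured faster by a constant factor.
-- outside the precondition, e.g. on resultsArray([1, 2], 0): A returns [2, -1, 2], B returns [-1, 1, 2]; on resultsArray([5], 0): A returns [5, -1], B returns [-1, 5]; on resultsArray([], 0): A raises IndexError, B returns [-1]
import Mathlib
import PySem

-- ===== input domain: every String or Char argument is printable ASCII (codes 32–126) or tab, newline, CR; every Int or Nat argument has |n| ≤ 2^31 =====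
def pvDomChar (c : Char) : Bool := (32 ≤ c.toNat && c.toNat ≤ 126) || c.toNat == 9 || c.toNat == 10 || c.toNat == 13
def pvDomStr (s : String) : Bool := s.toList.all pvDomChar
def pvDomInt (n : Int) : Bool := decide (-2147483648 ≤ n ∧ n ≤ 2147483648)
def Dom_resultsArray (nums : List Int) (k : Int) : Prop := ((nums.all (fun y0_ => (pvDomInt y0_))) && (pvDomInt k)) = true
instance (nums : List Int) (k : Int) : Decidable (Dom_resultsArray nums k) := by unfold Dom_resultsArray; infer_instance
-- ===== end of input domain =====

-- B replaces A's two-mode while loop (prev_valid fast path + inner validation scan with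
-- break-and-jump) by one uniform pass keeping a run-length counter and writing into a
-- pre-filled list (objective: simpler).

-- ===== PORT A =====
-- inner 'for j in range(i, i+k-1)' with break: returns (is_valid, j at the break).
-- (when the loop completes without a break, Python's leftover j is never read afterwards,
-- so the completed case returns a dummy 0; out-of-range indexing is unreachable inside
-- Pre_, so pyGetD's default 0 is never used there)
def aInner (nums : List Int) : List Int → Bool × Int
  | [] => (true, 0)
  | j :: rest =>
    if PySem.List.pyGetD nums (j + 1) 0 - PySem.List.pyGetD nums j 0 ≠ 1 then (false, j)
    else aInner nums rest

-- the while loop; fuel = len(nums)+1 strictly exceeds the iteration count for every k ≥ 1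
def aLoop (nums : List Int) (k n : Int) : Nat → Int → Bool → List Int → List Int
  | 0, _, _, res => res
  | fuel + 1, i, prev, res =>
    if i ≤ n - k then
      if prev then
        if PySem.List.pyGetD nums (i + k - 1) 0 - PySem.List.pyGetD nums (i + k - 2) 0 = 1 then
          aLoop nums k n fuel (i + 1) true (res ++ [PySem.List.pyGetD nums (i + k - 1) 0])
        else
          aLoop nums k n fuel (i + 1) false (res ++ [-1])
      else
        let p := aInner nums (PySem.List.pyRange i (i + k - 1) 1)
        if p.1 then
          aLoop nums k n fuel (i + 1) true (res ++ [PySem.List.pyGetD nums (i + k - 1) 0])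
        else
          aLoop nums k n fuel (p.2 + 1) false
            (res ++ List.replicate (min (n - k) p.2 + 1 - i).toNat (-1))
    else res

def resultsArray (nums : List Int) (k : Int) : List Int :=
  if k = 1 then nums
  else aLoop nums k (nums.length : Int) (nums.length + 1) 0 false []

-- ===== PORT B =====
def bLoop (nums : List Int) (k : Int) : List (Int × Int) → Int → List Int → List Int
  | [], _, res => res
  | (i, x) :: rest, cnt, res =>
    let cnt' := if 0 < i ∧ x - PySem.List.pyGetD nums (i - 1) 0 = 1 then cnt + 1 else 1
    let res' := if k ≤ cnt' then PySem.List.pySetD res (i - k + 1) x else res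
    bLoop nums k rest cnt' res'

def resultsArray_alt (nums : List Int) (k : Int) : List Int :=
  bLoop nums k (PySem.List.enumerate nums 0) 0
    (List.replicate ((nums.length : Int) - k + 1).toNat (-1))

-- ===== PRECONDITION & SPEC =====
-- Pre_ restricts to the problem's natural domain k ≥ 1 (the LeetCode task guarantees 1 ≤ k);
-- for k ≤ 0 A's returned values are accidents of negative-index wraparound (and A raises
-- IndexError on ([], 0)), so those inputs are excluded rather than mimicked.
def Pre_resultsArray (nums : List Int) (k : Int) : Prop := 1 ≤ k
instance (nums : List Int) (k : Int) : Decidable (Pre_resultsArray nums k) := by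
  unfold Pre_resultsArray; infer_instance
def pvWitness_resultsArray : List Int × Int := ([1, 2, 3, 5], 2)

def Spec_resultsArray (nums : List Int) (k : Int) (out : List Int) : Prop := out = resultsArray_alt nums k
instance (nums : List Int) (k : Int) (out : List Int) : Decidable (Spec_resultsArray nums k out) := by unfold Spec_resultsArray; infer_instance

-- ===== CLAIM (what is proved, stated in full; the proofs are below) =====
def Claim_equal_resultsArray : Prop := ∀ (nums : List Int) (k : Int), Dom_resultsArray nums k → Pre_resultsArray nums k → Spec_resultsArray nums k (resultsArray nums k)

-- ===== LEMMAS AND PROOFS =====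

-- reference characterisation: window starting at t is a run iff every step in [t, t+k-1) rises by 1
def stepOK (nums : List Int) (j : Int) : Bool :=
  PySem.List.pyGetD nums (j + 1) 0 - PySem.List.pyGetD nums j 0 == 1

def okRun (nums : List Int) (k t : Int) : Bool :=
  (PySem.List.pyRange t (t + k - 1) 1).all (stepOK nums)

def entryF (nums : List Int) (k t : Int) : Int :=
  if okRun nums k t then PySem.List.pyGetD nums (t + k - 1) 0 else -1

def specF (nums : List Int) (k : Int) : List Int :=
  (PySem.List.pyRange 0 ((nums.length : Int) - k + 1) 1).map (entryF nums k)

-- length of the increasing-by-1 run ending at index m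
def runLen (nums : List Int) : Nat → Int
  | 0 => 1
  | m + 1 =>
    if PySem.List.pyGetD nums ((m : Int) + 1) 0 - PySem.List.pyGetD nums (m : Int) 0 = 1
    then runLen nums m + 1 else 1

lemma okRun_one (nums : List Int) (t : Int) : okRun nums 1 t = true := by
  simp [okRun, PySem.List.pyRange_one_eq_nil (show t + 1 - 1 ≤ t by omega)]

lemma okRun_false_of (nums : List Int) (k t j : Int) (h1 : t ≤ j) (h2 : j < t + k - 1)
    (h3 : stepOK nums j = false) : okRun nums k t = false := by
  cases hx : okRun nums k t with
  | false => rfl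
  | true =>
    exfalso
    have hj : j ∈ PySem.List.pyRange t (t + k - 1) 1 :=
      (PySem.List.mem_pyRange_one).mpr ⟨h1, h2⟩
    have := List.all_eq_true.mp hx j hj
    rw [h3] at this
    exact Bool.false_ne_true this

lemma okRun_succ_right (nums : List Int) (k t : Int) (hk : 2 ≤ k) :
    okRun nums k t = (okRun nums (k - 1) t && stepOK nums (t + k - 2)) := by
  simp only [okRun]
  rw [show t + k - 1 = (t + k - 2) + 1 by ring,
      PySem.List.pyRange_one_succ_right (show t ≤ t + k - 2 by omega),
      show t + (k - 1) - 1 = t + k - 2 by ring]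
  simp

lemma okRun_cons (nums : List Int) (k t : Int) (hk : 2 ≤ k) :
    okRun nums k t = (stepOK nums t && okRun nums (k - 1) (t + 1)) := by
  simp only [okRun]
  rw [PySem.List.pyRange_one_cons (show t < t + k - 1 by omega),
      show t + 1 + (k - 1) - 1 = t + k - 1 by ring]
  simp

lemma okRun_shift (nums : List Int) (k t : Int) (hk : 2 ≤ k) (h : okRun nums k t = true) :
    okRun nums k (t + 1) = stepOK nums (t + k - 1) := by
  rw [okRun_cons nums k t hk] at h
  have h2 : okRun nums (k - 1) (t + 1) = true := by
    cases hx : okRun nums (k - 1) (t + 1) with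
    | true => rfl
    | false => rw [hx, Bool.and_false] at h; exact absurd h Bool.false_ne_true
  rw [okRun_succ_right nums k (t + 1) hk, show t + 1 + k - 2 = t + k - 1 by ring, h2]
  simp

lemma runLen_pos (nums : List Int) (m : Nat) : 1 ≤ runLen nums m := by
  induction m with
  | zero => simp [runLen]
  | succ m ih => simp only [runLen]; split_ifs <;> omega

lemma runLen_ge_iff (nums : List Int) (m : Nat) (c : Int) (hc : 1 ≤ c) :
    c ≤ runLen nums m ↔ (c ≤ (m : Int) + 1 ∧ okRun nums c ((m : Int) - c + 1) = true) := by
  induction m generalizing c with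
  | zero =>
    simp only [runLen, Nat.cast_zero]
    constructor
    · intro h
      have hc1 : c = 1 := by omega
      subst hc1
      exact ⟨by omega, by simpa using okRun_one nums 0⟩
    · intro ⟨h1, _⟩; omega
  | succ m ih =>
    simp only [runLen]
    by_cases hc1 : c = 1
    · subst hc1
      have := runLen_pos nums m
      constructor
      · intro _
        refine ⟨by push_cast; omega, ?_⟩
        simpa using okRun_one nums ((m : Int) + 1 - 1 + 1)
      · intro _; split_ifs <;> omega
    · have hc2 : 2 ≤ c := by omega
      have hstep : stepOK nums (m : Int) = (PySem.List.pyGetD nums ((m : Int) + 1) 0 - PySem.List.pyGetD nums (m : Int) 0 == 1) := rfl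
      have hsr : okRun nums c ((m : Int) - c + 2)
          = (okRun nums (c - 1) ((m : Int) - c + 2) && stepOK nums (m : Int)) := by
        rw [okRun_succ_right nums c ((m : Int) - c + 2) hc2,
            show (m : Int) - c + 2 + c - 2 = (m : Int) by ring]
      have hcast : ((m : Int) + 1) - c + 1 = (m : Int) - c + 2 := by ring
      split_ifs with hd
      · have hs : stepOK nums (m : Int) = true := by rw [hstep]; simpa using hd
        rw [hs, Bool.and_true] at hsr
        constructor
        · intro h
          have := (ih (c - 1) (by omega)).mp (by omega)
          refine ⟨by push_cast; omega, ?_⟩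
          push_cast
          rw [hcast, hsr, show (m : Int) - c + 2 = (m : Int) - (c - 1) + 1 by ring]
          exact this.2
        · intro ⟨h1, h2⟩
          push_cast at h1 h2
          rw [hcast, hsr, show (m : Int) - c + 2 = (m : Int) - (c - 1) + 1 by ring] at h2
          have := (ih (c - 1) (by omega)).mpr ⟨by omega, h2⟩
          omega
      · have hs : stepOK nums (m : Int) = false := by
          rw [hstep]; simpa using hd
        constructor
        · intro h; omega
        · intro ⟨h1, h2⟩
          exfalso
          push_cast at h2
          rw [hcast] at h2
          have : okRun nums c ((m : Int) - c + 2) = false :=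
            okRun_false_of nums c ((m : Int) - c + 2) (m : Int) (by omega) (by omega) hs
          rw [this] at h2
          exact Bool.false_ne_true h2

lemma aInner_fst (nums : List Int) (l : List Int) :
    (aInner nums l).1 = l.all (stepOK nums) := by
  induction l with
  | nil => simp [aInner]
  | cons j rest ih =>
    simp only [aInner, List.all_cons]
    split_ifs with h
    · simp [stepOK, h]
    · simp only [stepOK]
      rw [ih]
      simp at h
      simp [h]

lemma aInner_false (nums : List Int) (l : List Int) (j : Int)
    (h : aInner nums l = (false, j)) : j ∈ l ∧ stepOK nums j = false := by
  induction l with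
  | nil => simp [aInner] at h
  | cons x rest ih =>
    simp only [aInner] at h
    split_ifs at h with hx
    · simp at h
      subst h
      exact ⟨List.mem_cons_self, by simp [stepOK]; simpa using hx⟩
    · have := ih h
      exact ⟨List.mem_cons_of_mem x this.1, this.2⟩

lemma map_entry_replicate (nums : List Int) (k a b : Int)
    (h : ∀ t, a ≤ t → t < b → okRun nums k t = false) :
    (PySem.List.pyRange a b 1).map (entryF nums k) = List.replicate (b - a).toNat (-1) := by
  rw [List.eq_replicate_iff]
  constructor
  · simp [PySem.List.length_pyRange_one]
  · intro x hx
    obtain ⟨t, ht, rfl⟩ := List.mem_map.mp hx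
    obtain ⟨h1, h2⟩ := (PySem.List.mem_pyRange_one).mp ht
    simp [entryF, h t h1 h2]

lemma aLoop_spec (nums : List Int) (k : Int) (hk : 2 ≤ k) :
    ∀ (fuel : Nat) (i : Int) (prev : Bool) (res : List Int), 0 ≤ i →
      ((nums.length : Int) - k + 1 - i).toNat < fuel →
      (prev = true → okRun nums k (i - 1) = true) →
      aLoop nums k (nums.length : Int) fuel i prev res
        = res ++ (PySem.List.pyRange i ((nums.length : Int) - k + 1) 1).map (entryF nums k) := by
  intro fuel
  induction fuel with
  | zero => intro i prev res _ hf _; omega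
  | succ fuel ih =>
    intro i prev res h0 hf hprev
    by_cases hle : i ≤ (nums.length : Int) - k
    · have hcons : PySem.List.pyRange i ((nums.length : Int) - k + 1) 1
          = i :: PySem.List.pyRange (i + 1) ((nums.length : Int) - k + 1) 1 :=
        PySem.List.pyRange_one_cons (by omega)
      simp only [aLoop, if_pos hle]
      cases prev with
      | true =>
        have hok : okRun nums k (i - 1) = true := hprev rfl
        have hstep : okRun nums k i = stepOK nums (i + k - 2) := by
          have := okRun_shift nums k (i - 1) hk hok
          rw [show i - 1 + 1 = i by ring, show i - 1 + k - 1 = i + k - 2 by ring] at this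
          exact this
        rw [if_pos rfl]
        have hidx : i + k - 2 + 1 = i + k - 1 := by ring
        split_ifs with hd
        · have hoki : okRun nums k i = true := by
            rw [hstep]; simp only [stepOK, hidx]; simp [hd]
          rw [ih (i + 1) true _ (by omega) (by omega)
              (fun _ => by rw [show i + 1 - 1 = i by ring]; exact hoki)]
          rw [hcons]
          simp [entryF, hoki]
        · have hoki : okRun nums k i = false := by
            rw [hstep]; simp only [stepOK, hidx]; simp [hd]
          rw [ih (i + 1) false _ (by omega) (by omega) (by simp)]
          rw [hcons]
          simp [entryF, hoki]
      | false =>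
        rw [if_neg Bool.false_ne_true]
        rcases haI : aInner nums (PySem.List.pyRange i (i + k - 1) 1) with ⟨b, j⟩
        have hfst := aInner_fst nums (PySem.List.pyRange i (i + k - 1) 1)
        rw [haI] at hfst
        cases b with
        | true =>
          have hoki : okRun nums k i = true := by
            simp only [okRun]; exact hfst.symm
          dsimp only
          rw [if_pos rfl]
          rw [ih (i + 1) true _ (by omega) (by omega)
              (fun _ => by rw [show i + 1 - 1 = i by ring]; exact hoki)]
          rw [hcons]
          simp [entryF, hoki]
        | false =>
          obtain ⟨hjmem, hjstep⟩ := aInner_false nums _ j haI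
          obtain ⟨hj1, hj2⟩ := (PySem.List.mem_pyRange_one).mp hjmem
          have hbad : ∀ t, i ≤ t → t ≤ j → okRun nums k t = false := fun t ht1 ht2 =>
            okRun_false_of nums k t j ht2 (by omega) hjstep
          dsimp only
          rw [if_neg Bool.false_ne_true]
          rw [ih (j + 1) false _ (by omega) (by omega) (by simp)]
          by_cases hjn : j < (nums.length : Int) - k
          · have hmin : min ((nums.length : Int) - k) j = j := by omega
            rw [hmin,
                PySem.List.pyRange_one_append i (j + 1) ((nums.length : Int) - k + 1)
                  (by omega) (by omega),
                List.map_append,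
                map_entry_replicate nums k i (j + 1)
                  (fun t ht1 ht2 => hbad t ht1 (by omega)),
                show j + 1 - i = j + 1 - i by rfl]
            simp [List.append_assoc]
          · have hmin : min ((nums.length : Int) - k) j = (nums.length : Int) - k := by omega
            rw [hmin, PySem.List.pyRange_one_eq_nil (show (nums.length : Int) - k + 1 ≤ j + 1 by omega),
                map_entry_replicate nums k i ((nums.length : Int) - k + 1)
                  (fun t ht1 ht2 => hbad t ht1 (by omega))]
            simp [show (nums.length : Int) - k + 1 - i = (nums.length : Int) - k - i + 1 by ring]
    · simp only [aLoop, if_neg hle]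
      rw [PySem.List.pyRange_one_eq_nil (by omega)]
      simp

lemma specF_one (nums : List Int) : specF nums 1 = nums := by
  unfold specF
  rw [show (nums.length : Int) - 1 + 1 = (nums.length : Int) by ring]
  rw [List.map_congr_left
      (fun t _ => show entryF nums 1 t = PySem.List.pyGetD nums t 0 by
        simp [entryF, okRun_one, show t + 1 - 1 = t by ring])]
  exact PySem.List.map_pyGetD_pyRange_zero' nums 0

lemma A_eq_spec (nums : List Int) (k : Int) (hk : 1 ≤ k) :
    resultsArray nums k = specF nums k := by
  by_cases h1 : k = 1
  · subst h1
    simp [resultsArray, specF_one]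
  · have hk2 : 2 ≤ k := by omega
    unfold resultsArray
    rw [if_neg h1,
        aLoop_spec nums k hk2 (nums.length + 1) 0 false [] (by omega) (by omega) (by simp)]
    simp [specF]

-- the result list after processing the first m elements in B
def resAt (nums : List Int) (k : Int) (m : Nat) : List Int :=
  (PySem.List.pyRange 0 ((nums.length : Int) - k + 1) 1).map
    (fun t => if t + k ≤ (m : Int) ∧ okRun nums k t = true
              then PySem.List.pyGetD nums (t + k - 1) 0 else -1)

lemma set_map_pyRange (a b idx : Int) (f : Int → Int) (v : Int) (h1 : a ≤ idx) (h2 : idx < b) :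
    PySem.List.pySetD ((PySem.List.pyRange a b 1).map f) (idx - a) v
      = (PySem.List.pyRange a b 1).map (fun t => if t = idx then v else f t) := by
  rw [PySem.List.pySetD_of_nonneg _ _ (by omega : (0:Int) ≤ idx - a)]
  apply List.ext_getElem
  · simp
  · intro p hp1 hp2
    simp only [List.getElem_set, List.getElem_map]
    have hlen : p < (PySem.List.pyRange a b 1).length := by
      simpa using hp2
    rw [PySem.List.getElem_pyRange_one a b p hlen]
    have hplt : (p : Int) < b - a := by
      have := hlen
      rw [PySem.List.length_pyRange_one] at this
      omega
    by_cases he : (idx - a).toNat = p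
    · rw [if_pos he, if_pos (by omega)]
    · rw [if_neg he, if_neg (by omega)]

lemma bLoop_inv (nums : List Int) (k : Int) (hk : 1 ≤ k) :
    ∀ (d : Nat) (m : Nat), m + d = nums.length →
      bLoop nums k (PySem.List.enumerate (nums.drop m) (m : Int))
        (if m = 0 then 0 else runLen nums (m - 1)) (resAt nums k m)
      = resAt nums k nums.length := by
  intro d
  induction d with
  | zero =>
    intro m hm
    have : m = nums.length := by omega
    subst this
    simp [bLoop, List.drop_length, PySem.List.enumerate]
  | succ d ih =>
    intro m hm
    have hmlt : m < nums.length := by omega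
    rw [List.drop_eq_getElem_cons hmlt, PySem.List.enumerate_cons]
    simp only [bLoop]
    have hget : nums[m] = PySem.List.pyGetD nums (m : Int) 0 := by
      rw [PySem.List.pyGetD_natCast, List.getD_eq_getElem nums 0 hmlt]
    have hcnt : (if 0 < (m : Int) ∧ nums[m] - PySem.List.pyGetD nums ((m : Int) - 1) 0 = 1
        then (if m = 0 then 0 else runLen nums (m - 1)) + 1 else 1) = runLen nums m := by
      cases m with
      | zero => simp [runLen]
      | succ m' =>
        have he2 : nums[m' + 1] = PySem.List.pyGetD nums (((m' + 1 : Nat) : Int)) 0 := hget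
        simp only [runLen, Nat.add_sub_cancel, he2]
        rw [if_neg (Nat.succ_ne_zero m')]
        rw [if_congr (and_iff_right (show (0 : Int) < ((m' + 1 : Nat) : Int) by push_cast; omega)) rfl rfl]
        rw [show (((m' + 1 : Nat) : Int)) - 1 = (m' : Int) by push_cast; ring,
            show (((m' + 1 : Nat) : Int)) = (m' : Int) + 1 by push_cast; ring]
    rw [hcnt]
    have hres : (if k ≤ runLen nums m
        then PySem.List.pySetD (resAt nums k m) ((m : Int) - k + 1) nums[m]
        else resAt nums k m) = resAt nums k (m + 1) := by
      by_cases hw : k ≤ runLen nums m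
      · rw [if_pos hw]
        obtain ⟨hle, hok⟩ := (runLen_ge_iff nums m k hk).mp hw
        have hblt : (m : Int) - k + 1 < (nums.length : Int) - k + 1 := by
          have : (m : Int) < (nums.length : Int) := by exact_mod_cast hmlt
          omega
        unfold resAt
        rw [show (m : Int) - k + 1 = ((m : Int) - k + 1) - 0 by ring,
            set_map_pyRange 0 ((nums.length : Int) - k + 1) ((m : Int) - k + 1) _ _
              (by omega) hblt]
        apply List.map_congr_left
        intro t ht
        obtain ⟨ht1, ht2⟩ := (PySem.List.mem_pyRange_one).mp ht
        by_cases he : t = (m : Int) - k + 1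
        · rw [if_pos he, if_pos (by subst he; exact ⟨by push_cast; omega, hok⟩)]
          subst he
          rw [show (m : Int) - k + 1 + k - 1 = (m : Int) by ring]
          exact hget
        · rw [if_neg he]
          have : (t + k ≤ ((m + 1 : Nat) : Int)) ↔ (t + k ≤ (m : Int)) := by
            push_cast; omega
          simp only [this]
      · rw [if_neg hw]
        have hnot : ¬(k ≤ (m : Int) + 1 ∧ okRun nums k ((m : Int) - k + 1) = true) :=
          fun h => hw ((runLen_ge_iff nums m k hk).mpr h)
        unfold resAt
        apply List.map_congr_left
        intro t ht
        obtain ⟨ht1, ht2⟩ := (PySem.List.mem_pyRange_one).mp ht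
        by_cases he : t = (m : Int) - k + 1
        · have hokf : okRun nums k t ≠ true := by
            intro hh
            exact hnot ⟨by omega, by rw [← he]; exact hh⟩
          rw [if_neg (fun h => hokf h.2), if_neg (fun h => hokf h.2)]
        · have : (t + k ≤ ((m + 1 : Nat) : Int)) ↔ (t + k ≤ (m : Int)) := by
            push_cast; omega
          simp only [this]
    rw [hres, show (m : Int) + 1 = ((m + 1 : Nat) : Int) by push_cast; ring]
    have := ih (m + 1) (by omega)
    rw [if_neg (by omega : ¬(m + 1 = 0)), Nat.add_sub_cancel] at this
    exact this

lemma resAt_zero (nums : List Int) (k : Int) (hk : 1 ≤ k) :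
    resAt nums k 0 = List.replicate ((nums.length : Int) - k + 1).toNat (-1) := by
  unfold resAt
  rw [List.eq_replicate_iff]
  constructor
  · simp [PySem.List.length_pyRange_one]
  · intro x hx
    obtain ⟨t, ht, rfl⟩ := List.mem_map.mp hx
    obtain ⟨ht1, _⟩ := (PySem.List.mem_pyRange_one).mp ht
    rw [if_neg]
    intro h
    obtain ⟨h1, -⟩ := h
    push_cast at h1
    omega

lemma resAt_full (nums : List Int) (k : Int) (hk : 1 ≤ k) :
    resAt nums k nums.length = specF nums k := by
  unfold resAt specF
  apply List.map_congr_left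
  intro t ht
  obtain ⟨ht1, ht2⟩ := (PySem.List.mem_pyRange_one).mp ht
  unfold entryF
  by_cases ho : okRun nums k t = true
  · rw [if_pos ⟨by omega, ho⟩, if_pos ho]
  · rw [if_neg (fun h => ho h.2), if_neg ho]

lemma B_eq_spec (nums : List Int) (k : Int) (hk : 1 ≤ k) :
    resultsArray_alt nums k = specF nums k := by
  unfold resultsArray_alt
  rw [← resAt_zero nums k hk, ← resAt_full nums k hk]
  have := bLoop_inv nums k hk nums.length 0 (by omega)
  rw [if_pos rfl, List.drop_zero, Nat.cast_zero] at this
  exact this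

-- ===== VERDICT (by name: the statement is the Claim_ definition above) =====
theorem resultsArray_spec : Claim_equal_resultsArray := by
  intro nums k _ hpre
  unfold Spec_resultsArray
  rw [A_eq_spec nums k hpre, B_eq_spec nums k hpre]
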